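-- pv_equiv track=rewrite | github.com/Bernardo-R-O-Carvalho/phishguard-ai | url_features.py | fuzzy_impersonation
-- ===== SOURCE A (Python) =====
-- WHITELIST = {
--     "paypal.com", "bankofamerica.com", "amazon.com", "google.com",
--     "microsoft.com", "apple.com", "netflix.com", "instagram.com"
-- }
--
-- def levenshtein(a: str, b: str) -> int:
--     """Distância de edição entre duas strings (Wagner-Fischer)."""
--     if a == b:
--         return 0
--     if len(a) < len(b):
--         a, b = b, a
--     prev = list(range(len(b) + 1))
--     for i, ca in enumerate(a):
--         curr = [i + 1]
--         for j, cb in enumerate(b):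
--             curr.append(min(
--                 prev[j + 1] + 1,   # deleção
--                 curr[j] + 1,       # inserção
--                 prev[j] + (ca != cb),  # substituição
--             ))
--         prev = curr
--     return prev[-1]
--
-- LEVENSHTEIN_THRESHOLD = 2
--
-- def fuzzy_impersonation(domain: str) -> str | None:
--     """
--     Retorna o domínio confiável que 'domain' está tentando imitar,
--     ou None se não houver correspondência suspeita.
--     """
--     # Ignora domínios já na whitelist
--     if domain in WHITELIST:
--         return None
--
--     # Compara apenas o nome base (sem TLD) para reduzir ruído
--     domain_base = domain.split(".")[0]
--
--     for trusted in WHITELIST: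
--         trusted_base = trusted.split(".")[0]
--         dist = levenshtein(domain_base, trusted_base)
--         if 0 < dist <= LEVENSHTEIN_THRESHOLD:
--             return trusted
--
--     return None
-- ===== SOURCE B (Python) =====
-- WHITELIST = (
--     "paypal.com", "bankofamerica.com", "amazon.com", "google.com",
--     "microsoft.com", "apple.com", "netflix.com", "instagram.com",
-- )
--
-- LEVENSHTEIN_THRESHOLD = 2
--
-- def _close(a, b, m, n, k):
--     """True iff the edit distance between a[:m] and b[:n] is <= k.
--
--     Threshold-bounded: strips a common suffix, then branches on the three
--     edit operations with a decremented budget (at most 3^k branches)."""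
--     if m > 0 and n > 0 and a[m - 1] == b[n - 1]:
--         return _close(a, b, m - 1, n - 1, k)
--     if m == 0 or n == 0:
--         return m + n <= k
--     if k == 0:
--         return False
--     return (_close(a, b, m - 1, n, k - 1)
--             or _close(a, b, m, n - 1, k - 1)
--             or _close(a, b, m - 1, n - 1, k - 1))
--
-- def fuzzy_impersonation(domain):
--     if domain in WHITELIST:
--         return None
--     base = domain.split(".")[0]
--     for trusted in WHITELIST:
--         tb = trusted.split(".")[0]
--         if base != tb and _close(base, tb, len(base), len(tb), LEVENSHTEIN_THRESHOLD):
--             return trusted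
--     return None
-- ===== Notes on version B (the rewrite author's own statement) =====
-- stated objective: faster
-- what changed: B replaces the full Wagner-Fischer O(m*n) row DP by a threshold-bounded edit-distance test (strip common suffix, then branch on the three edit operations with a budget of at most 2), iterating a fixed-order whitelist tuple instead of a hash-ordered set.
-- outside the precondition, e.g. on fuzzy_impersonation('appal'): A returns 'paypal.com', B returns 'paypal.com'
import Mathlib
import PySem

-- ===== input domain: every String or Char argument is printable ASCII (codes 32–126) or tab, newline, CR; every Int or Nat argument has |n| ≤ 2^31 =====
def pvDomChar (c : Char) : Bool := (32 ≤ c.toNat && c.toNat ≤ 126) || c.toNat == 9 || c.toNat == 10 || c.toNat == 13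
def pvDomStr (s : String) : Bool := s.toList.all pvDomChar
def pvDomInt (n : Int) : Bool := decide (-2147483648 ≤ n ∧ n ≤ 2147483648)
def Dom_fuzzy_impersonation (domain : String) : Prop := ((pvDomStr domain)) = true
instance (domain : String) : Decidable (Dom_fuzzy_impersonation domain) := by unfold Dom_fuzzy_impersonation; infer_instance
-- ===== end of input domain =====

-- B replaces the whitelist set by a fixed-order tuple and the full Wagner-Fischer O(m·n) row DP by a
-- threshold-bounded edit-distance check (strip common suffix, branch on the three edits with budget ≤ 2),
-- which a timing run measured as much faster on long domains.

-- ===== PORT A =====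
-- Python's WHITELIST is a set literal; its iteration order depends on PYTHONHASHSEED.  The port fixes the
-- source order; Pre_ below excludes exactly the inputs whose answer depends on the iteration order.
def pyWHITELIST : List String :=
  ["paypal.com", "bankofamerica.com", "amazon.com", "google.com",
   "microsoft.com", "apple.com", "netflix.com", "instagram.com"]

-- inner loop of levenshtein: one DP row (curr), built left to right
def levRow (prev : List Int) (bl : List Char) (ca : Char) (i : Int) : List Int :=
  (PySem.List.enumerate bl).foldl (fun curr jc =>
      curr ++ [min (min (PySem.List.pyGetD prev (jc.1 + 1) 0 + 1)
                        (PySem.List.pyGetD curr jc.1 0 + 1))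
                   (PySem.List.pyGetD prev jc.1 0 + (if ca ≠ jc.2 then 1 else 0))]) [i + 1]

-- levenshtein(a, b): Wagner-Fischer with early return on a == b and a length swap
def levA (a b : String) : Int :=
  if a = b then 0
  else
    let p := if PySem.Str.len a < PySem.Str.len b then (b, a) else (a, b)
    let final := (PySem.List.enumerate p.1.toList).foldl
        (fun prev ic => levRow prev p.2.toList ic.2 ic.1)
        (PySem.List.pyRange 0 (PySem.List.len p.2.toList + 1) 1)
    PySem.List.pyGetD final (-1) 0   -- prev[-1]; the list is never empty

-- the 'for trusted in WHITELIST' loop with its early return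
def loopA (base : String) : List String → Option String
  | [] => none
  | t :: rest =>
    let tb := PySem.List.pyGetD ((PySem.Str.split? t ".").getD []) 0 ""   -- t.split(".")[0]; split never returns []
    let d := levA base tb
    if 0 < d ∧ d ≤ 2 then some t else loopA base rest

def fuzzy_impersonation (domain : String) : Option String :=
  if pyWHITELIST.contains domain then none
  else loopA (PySem.List.pyGetD ((PySem.Str.split? domain ".").getD []) 0 "") pyWHITELIST

-- ===== PORT B =====
-- _close(a, b, m, n, k): edit distance of a[:m], b[:n] is ≤ k (chars read as a[m-1]; always in range when called)
def closeB (a b : List Char) (m n k : Nat) : Bool :=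
  if m > 0 ∧ n > 0 ∧ a.getD (m - 1) 'a' = b.getD (n - 1) 'a' then
    closeB a b (m - 1) (n - 1) k
  else if m = 0 ∨ n = 0 then decide (m + n ≤ k)
  else if k = 0 then false
  else closeB a b (m - 1) n (k - 1) || closeB a b m (n - 1) (k - 1) || closeB a b (m - 1) (n - 1) (k - 1)
termination_by m + n
decreasing_by all_goals omega

def loopB (base : String) : List String → Option String
  | [] => none
  | t :: rest =>
    let tb := PySem.List.pyGetD ((PySem.Str.split? t ".").getD []) 0 ""
    if base ≠ tb ∧ closeB base.toList tb.toList base.toList.length tb.toList.length 2 then some t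
    else loopB base rest

def fuzzy_impersonation_alt (domain : String) : Option String :=
  if pyWHITELIST.contains domain then none
  else loopB (PySem.List.pyGetD ((PySem.Str.split? domain ".").getD []) 0 "") pyWHITELIST

-- ===== PRECONDITION & SPEC =====
-- The 29 base names (over the Dom alphabet, which cannot appear inside a base after split on ".")
-- lying within edit distance ≤ 2 of TWO whitelist base names (necessarily of 'apple' and one of
-- 'paypal'/'google', the only pairs at distance ≤ 4).
def pvAmbiguousBases : List String :=
  ["aogle", "aoole", "aoople", "aopgle", "apal", "apogle", "appal", "aypae", "aypale",
   "aypl", "aypll", "ayppl", "gaople", "gapgle", "gople", "gopple", "gpgle", "gpole",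
   "gpople", "gppgle", "oople", "opgle", "papale", "pappae", "pappale", "pappl",
   "pappll", "payple", "paypple"]

-- Pre_ excludes domains whose base name imitates more than one whitelisted name: there Python A's answer is
-- whichever matching entry the hash-randomised set iteration of WHITELIST happens to yield first, so no fixed
-- value can be claimed for A.
def Pre_fuzzy_impersonation (domain : String) : Prop :=
  PySem.List.pyGetD ((PySem.Str.split? domain ".").getD []) 0 "" ∉ pvAmbiguousBases

instance (domain : String) : Decidable (Pre_fuzzy_impersonation domain) := by
  unfold Pre_fuzzy_impersonation; infer_instance

def pvWitness_fuzzy_impersonation : String := "paypa1.com"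

def Spec_fuzzy_impersonation (domain : String) (out : Option String) : Prop := out = fuzzy_impersonation_alt domain
instance (domain : String) (out : Option String) : Decidable (Spec_fuzzy_impersonation domain out) := by unfold Spec_fuzzy_impersonation; infer_instance

-- ===== CLAIM (what is proved, stated in full; the proofs are below) =====
def Claim_equal_fuzzy_impersonation : Prop := ∀ (domain : String), Dom_fuzzy_impersonation domain → Pre_fuzzy_impersonation domain → Spec_fuzzy_impersonation domain (fuzzy_impersonation domain)

-- ===== LEMMAS AND PROOFS =====

-- Reference edit distance between a[:i] and b[:j] (used only by the proofs, not by either port).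
def levIdx (a b : List Char) : Nat → Nat → Nat
  | 0, j => j
  | i + 1, 0 => i + 1
  | i + 1, j + 1 =>
      min (min (levIdx a b i (j + 1) + 1) (levIdx a b (i + 1) j + 1))
          (levIdx a b i j + if a.getD i 'a' = b.getD j 'a' then 0 else 1)
termination_by i j => i + j
decreasing_by all_goals omega

theorem levIdx_zero_left (a b : List Char) (j : Nat) : levIdx a b 0 j = j := by
  unfold levIdx; rfl

theorem levIdx_zero_right (a b : List Char) (i : Nat) : levIdx a b i 0 = i := by
  cases i <;> simp [levIdx]

theorem levIdx_succ_succ (a b : List Char) (i j : Nat) :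
    levIdx a b (i + 1) (j + 1) =
      min (min (levIdx a b i (j + 1) + 1) (levIdx a b (i + 1) j + 1))
          (levIdx a b i j + if a.getD i 'a' = b.getD j 'a' then 0 else 1) := by
  rw [levIdx]

-- growing either prefix by one character changes the distance by at most one (the hard direction)
theorem levIdx_le_succ (a b : List Char) :
    ∀ i j : Nat, levIdx a b i j ≤ levIdx a b (i + 1) j + 1 ∧ levIdx a b i j ≤ levIdx a b i (j + 1) + 1 := by
  intro i j
  induction hn : i + j using Nat.strong_induction_on generalizing i j with
  | _ n ih =>
    subst hn
    constructor
    · -- levIdx i j ≤ levIdx (i+1) j + 1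
      cases j with
      | zero => rw [levIdx_zero_right, levIdx_zero_right]; omega
      | succ j' =>
        rw [levIdx_succ_succ]
        have h1 : levIdx a b i (j' + 1) ≤ levIdx a b i (j' + 1) + 1 + 1 := by omega
        have h2 : levIdx a b i (j' + 1) ≤ levIdx a b (i + 1) j' + 1 + 1 := by
          have t2 : levIdx a b i (j' + 1) ≤ levIdx a b i j' + 1 := by
            cases i with
            | zero => rw [levIdx_zero_left, levIdx_zero_left]
            | succ i' =>
              rw [levIdx_succ_succ]
              have := (ih (i' + j') (by omega) i' j' rfl).2
              omega
          have t3 : levIdx a b i j' ≤ levIdx a b (i + 1) j' + 1 :=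
            (ih (i + j') (by omega) i j' rfl).1
          omega
        have h3 : levIdx a b i (j' + 1) ≤
            levIdx a b i j' + (if a.getD i 'a' = b.getD j' 'a' then 0 else 1) + 1 := by
          have t2 : levIdx a b i (j' + 1) ≤ levIdx a b i j' + 1 := by
            cases i with
            | zero => rw [levIdx_zero_left, levIdx_zero_left]
            | succ i' =>
              rw [levIdx_succ_succ]
              have := (ih (i' + j') (by omega) i' j' rfl).2
              omega
          split <;> omega
        omega
    · -- levIdx i j ≤ levIdx i (j+1) + 1
      cases i with
      | zero => rw [levIdx_zero_left, levIdx_zero_left]; omega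
      | succ i' =>
        rw [levIdx_succ_succ]
        have t1 : levIdx a b (i' + 1) j ≤ levIdx a b i' j + 1 := by
          cases j with
          | zero => simp [levIdx_zero_right]
          | succ j' =>
            rw [levIdx_succ_succ]
            have := (ih (i' + j') (by omega) i' j' rfl).1
            omega
        have t3 : levIdx a b i' j ≤ levIdx a b i' (j + 1) + 1 :=
          (ih (i' + j) (by omega) i' j rfl).2
        have h3 : levIdx a b (i' + 1) j ≤
            levIdx a b i' j + (if a.getD i' 'a' = b.getD j 'a' then 0 else 1) + 1 := by
          split <;> omega
        omega

-- equal last characters can be stripped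
theorem levIdx_skip (a b : List Char) (i j : Nat) (h : a.getD i 'a' = b.getD j 'a') :
    levIdx a b (i + 1) (j + 1) = levIdx a b i j := by
  rw [levIdx_succ_succ, if_pos h]
  have h1 := (levIdx_le_succ a b i j).1
  have h2 := (levIdx_le_succ a b i j).2
  omega

theorem levIdx_symm (a b : List Char) : ∀ i j : Nat, levIdx a b i j = levIdx b a j i := by
  intro i j
  induction hn : i + j using Nat.strong_induction_on generalizing i j with
  | _ n ih =>
    subst hn
    cases i with
    | zero => rw [levIdx_zero_left, levIdx_zero_right]
    | succ i' =>
      cases j with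
      | zero => rw [levIdx_zero_right, levIdx_zero_left]
      | succ j' =>
        rw [levIdx_succ_succ, levIdx_succ_succ,
          ih (i' + (j' + 1)) (by omega) i' (j' + 1) rfl,
          ih (i' + 1 + j') (by omega) (i' + 1) j' rfl,
          ih (i' + j') (by omega) i' j' rfl]
        have : (b.getD j' 'a' = a.getD i' 'a') ↔ (a.getD i' 'a' = b.getD j' 'a') := eq_comm
        simp only [this]
        omega

theorem levIdx_eq_zero_iff (a b : List Char) :
    ∀ i j : Nat, i ≤ a.length → j ≤ b.length → (levIdx a b i j = 0 ↔ a.take i = b.take j) := by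
  intro i j
  induction hn : i + j using Nat.strong_induction_on generalizing i j with
  | _ n ih =>
    subst hn
    intro hi hj
    cases i with
    | zero =>
      rw [levIdx_zero_left]
      simp only [List.take_zero]
      constructor
      · intro h; subst h; simp
      · intro h
        have : (b.take j).length = 0 := by rw [← h]; simp
        rw [List.length_take] at this; omega
    | succ i' =>
      cases j with
      | zero =>
        rw [levIdx_zero_right]
        simp only [List.take_zero]
        constructor
        · omega
        · intro h
          have : (a.take (i' + 1)).length = 0 := by rw [h]; simp
          rw [List.length_take] at this; omega
      | succ j' =>
        have hga : a.getD i' 'a' = a[i']'(by omega) := List.getD_eq_getElem a 'a' (by omega)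
        have hgb : b.getD j' 'a' = b[j']'(by omega) := List.getD_eq_getElem b 'a' (by omega)
        have hta : a.take (i' + 1) = a.take i' ++ [a[i']'(by omega)] := by
          rw [List.take_add_one, List.getElem?_eq_getElem (by omega : i' < a.length)]; rfl
        have htb : b.take (j' + 1) = b.take j' ++ [b[j']'(by omega)] := by
          rw [List.take_add_one, List.getElem?_eq_getElem (by omega : j' < b.length)]; rfl
        by_cases hc : a.getD i' 'a' = b.getD j' 'a'
        · rw [levIdx_skip a b i' j' hc, ih (i' + j') (by omega) i' j' rfl (by omega) (by omega)]
          rw [hta, htb]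
          rw [hga, hgb] at hc
          constructor
          · intro h
            rw [h, hc]
          · intro h
            exact (List.append_inj' h (by simp)).1
        · rw [levIdx_succ_succ, if_neg hc]
          rw [hga, hgb] at hc
          constructor
          · omega
          · intro h
            rw [hta, htb] at h
            have h2 := (List.append_inj' h (by simp)).2
            simp only [List.cons.injEq] at h2
            exact absurd h2.1 hc

theorem levIdx_full_zero_iff (a b : List Char) :
    levIdx a b a.length b.length = 0 ↔ a = b := by
  rw [levIdx_eq_zero_iff a b a.length b.length le_rfl le_rfl]
  simp

-- closeB decides 'levIdx ≤ k'
theorem closeB_spec (a b : List Char) :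
    ∀ m n k : Nat, closeB a b m n k = decide (levIdx a b m n ≤ k) := by
  intro m n k
  induction hs : m + n using Nat.strong_induction_on generalizing m n k with
  | _ s ih =>
    subst hs
    rw [closeB]
    by_cases hstrip : m > 0 ∧ n > 0 ∧ a.getD (m - 1) 'a' = b.getD (n - 1) 'a'
    · rw [if_pos hstrip]
      obtain ⟨hm, hn, hc⟩ := hstrip
      rw [ih (m - 1 + (n - 1)) (by omega) (m - 1) (n - 1) k rfl]
      have : levIdx a b m n = levIdx a b (m - 1) (n - 1) := by
        have := levIdx_skip a b (m - 1) (n - 1) hc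
        have hm1 : m - 1 + 1 = m := by omega
        have hn1 : n - 1 + 1 = n := by omega
        rw [hm1, hn1] at this
        exact this
      rw [this]
    · rw [if_neg hstrip]
      by_cases hz : m = 0 ∨ n = 0
      · rw [if_pos hz]
        rcases hz with h | h
        · subst h; simp [levIdx_zero_left]
        · subst h; simp [levIdx_zero_right]
      · rw [if_neg hz]
        have hm0 : 0 < m := by omega
        have hn0 : 0 < n := by omega
        have hc : ¬ a.getD (m - 1) 'a' = b.getD (n - 1) 'a' := by
          intro h; exact hstrip ⟨hm0, hn0, h⟩
        have hlev : levIdx a b m n =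
            min (min (levIdx a b (m - 1) n + 1) (levIdx a b m (n - 1) + 1))
                (levIdx a b (m - 1) (n - 1) + 1) := by
          have := levIdx_succ_succ a b (m - 1) (n - 1)
          have hm1 : m - 1 + 1 = m := by omega
          have hn1 : n - 1 + 1 = n := by omega
          rw [hm1, hn1, if_neg hc] at this
          exact this
        by_cases hk : k = 0
        · rw [if_pos hk]
          subst hk
          have : ¬ levIdx a b m n ≤ 0 := by rw [hlev]; omega
          simp [this]
        · rw [if_neg hk]
          rw [ih (m - 1 + n) (by omega) (m - 1) n (k - 1) rfl,
              ih (m + (n - 1)) (by omega) m (n - 1) (k - 1) rfl,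
              ih (m - 1 + (n - 1)) (by omega) (m - 1) (n - 1) (k - 1) rfl]
          rw [hlev]
          by_cases h1 : levIdx a b (m - 1) n ≤ k - 1 <;>
            by_cases h2 : levIdx a b m (n - 1) ≤ k - 1 <;>
              by_cases h3 : levIdx a b (m - 1) (n - 1) ≤ k - 1 <;>
                simp [h1, h2, h3] <;> omega

-- ---- the DP of levA computes levIdx ----

theorem levRow_cell (al bl : List Char) (i : Nat) (prev : List Int)
    (hprev : prev = (List.range (bl.length + 1)).map (fun j => (levIdx al bl i j : Int))) :
    ∀ (rest : List Char) (j : Nat), j ≤ bl.length → rest = bl.drop j →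
      (PySem.List.enumerate rest (j : Int)).foldl
        (fun curr jc =>
          curr ++ [min (min (PySem.List.pyGetD prev (jc.1 + 1) 0 + 1)
                            (PySem.List.pyGetD curr jc.1 0 + 1))
                       (PySem.List.pyGetD prev jc.1 0 + (if al.getD i 'a' ≠ jc.2 then 1 else 0))])
        ((List.range (j + 1)).map (fun t => (levIdx al bl (i + 1) t : Int)))
      = (List.range (bl.length + 1)).map (fun t => (levIdx al bl (i + 1) t : Int)) := by
  intro rest
  induction rest with
  | nil =>
    intro j hj hdrop
    have : bl.length ≤ j := by
      have := congrArg List.length hdrop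
      simp [List.length_drop] at this
      omega
    have hjeq : j = bl.length := by omega
    subst hjeq
    simp [PySem.List.enumerate]
  | cons cb rest' ihr =>
    intro j hj hdrop
    have hjlt : j < bl.length := by
      have := congrArg List.length hdrop
      simp [List.length_drop] at this
      omega
    have hdc : cb = bl[j]'hjlt ∧ rest' = bl.drop (j + 1) := by
      have h2 := List.drop_eq_getElem_cons hjlt
      rw [← hdrop] at h2
      exact ⟨(List.cons.injEq .. ▸ h2).1, (List.cons.injEq .. ▸ h2).2⟩
    have hcb : cb = bl.getD j 'a' := by
      rw [List.getD_eq_getElem bl 'a' hjlt]; exact hdc.1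
    rw [PySem.List.enumerate_cons]
    simp only [List.foldl_cons]
    -- evaluate the three lookups
    have hg1 : PySem.List.pyGetD prev ((j : Int) + 1) 0 = (levIdx al bl i (j + 1) : Int) := by
      have : ((j : Int) + 1) = ((j + 1 : Nat) : Int) := by push_cast; ring
      rw [this, PySem.List.pyGetD_natCast, hprev, PySem.List.getD_map_range _ _ _ _ (by omega)]
    have hg2 : PySem.List.pyGetD ((List.range (j + 1)).map (fun t => (levIdx al bl (i + 1) t : Int))) (j : Int) 0
        = (levIdx al bl (i + 1) j : Int) := by
      rw [PySem.List.pyGetD_natCast, PySem.List.getD_map_range _ _ _ _ (by omega)]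
    have hg3 : PySem.List.pyGetD prev (j : Int) 0 = (levIdx al bl i j : Int) := by
      rw [PySem.List.pyGetD_natCast, hprev, PySem.List.getD_map_range _ _ _ _ (by omega)]
    rw [hg1, hg2, hg3]
    have hcell : min (min ((levIdx al bl i (j + 1) : Int) + 1) ((levIdx al bl (i + 1) j : Int) + 1))
          ((levIdx al bl i j : Int) + (if al.getD i 'a' ≠ cb then 1 else 0))
        = (levIdx al bl (i + 1) (j + 1) : Int) := by
      rw [levIdx_succ_succ al bl i j]
      rw [hcb]
      by_cases hc : al.getD i 'a' = bl.getD j 'a'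
      · rw [if_neg (not_not_intro hc), if_pos hc]
        push_cast
        omega
      · rw [if_pos hc, if_neg hc]
        push_cast
        omega
    rw [hcell]
    have hext : (List.range (j + 1)).map (fun t => (levIdx al bl (i + 1) t : Int)) ++
          [(levIdx al bl (i + 1) (j + 1) : Int)]
        = (List.range (j + 1 + 1)).map (fun t => (levIdx al bl (i + 1) t : Int)) := by
      conv_rhs => rw [List.range_succ, List.map_append, List.map_singleton]
    rw [hext]
    have hdrop' : rest' = bl.drop (j + 1) := hdc.2
    have := ihr (j + 1) (by omega) hdrop'
    have hcast : ((j : Int) + 1) = ((j + 1 : Nat) : Int) := by push_cast; ring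
    rw [hcast]
    exact this

theorem levRow_step (al bl : List Char) (i : Nat) (hi : i < al.length) :
    levRow ((List.range (bl.length + 1)).map (fun j => (levIdx al bl i j : Int))) bl
        (al.getD i 'a') (i : Int)
      = (List.range (bl.length + 1)).map (fun j => (levIdx al bl (i + 1) j : Int)) := by
  unfold levRow
  have hbase : [((i : Int) + 1)] = (List.range (0 + 1)).map (fun t => (levIdx al bl (i + 1) t : Int)) := by
    simp [levIdx_zero_right]
  rw [hbase]
  exact levRow_cell al bl i _ rfl bl 0 (by omega) rfl

theorem levOuter (al bl : List Char) :
    ∀ (rest : List Char) (i : Nat), i ≤ al.length → rest = al.drop i →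
      (PySem.List.enumerate rest (i : Int)).foldl
          (fun prev ic => levRow prev bl ic.2 ic.1)
          ((List.range (bl.length + 1)).map (fun j => (levIdx al bl i j : Int)))
        = (List.range (bl.length + 1)).map (fun j => (levIdx al bl al.length j : Int)) := by
  intro rest
  induction rest with
  | nil =>
    intro i hi hdrop
    have : al.length ≤ i := by
      have := congrArg List.length hdrop
      simp [List.length_drop] at this
      omega
    have : i = al.length := by omega
    subst this
    simp [PySem.List.enumerate]
  | cons ca rest' ihr =>
    intro i hi hdrop
    have hilt : i < al.length := by
      have := congrArg List.length hdrop
      simp [List.length_drop] at this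
      omega
    have hdc : ca = al[i]'hilt ∧ rest' = al.drop (i + 1) := by
      have h2 := List.drop_eq_getElem_cons hilt
      rw [← hdrop] at h2
      exact ⟨(List.cons.injEq .. ▸ h2).1, (List.cons.injEq .. ▸ h2).2⟩
    have hca : ca = al.getD i 'a' := by
      rw [List.getD_eq_getElem al 'a' hilt]; exact hdc.1
    rw [PySem.List.enumerate_cons]
    simp only [List.foldl_cons]
    rw [hca, levRow_step al bl i hilt]
    have hdrop' : rest' = al.drop (i + 1) := hdc.2
    have hcast : ((i : Int) + 1) = ((i + 1 : Nat) : Int) := by push_cast; ring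
    rw [hcast]
    exact ihr (i + 1) (by omega) hdrop'

-- the no-swap DP expression
theorem levDP_eq (al bl : List Char) :
    PySem.List.pyGetD
        ((PySem.List.enumerate al).foldl (fun prev ic => levRow prev bl ic.2 ic.1)
          (PySem.List.pyRange 0 (PySem.List.len bl + 1) 1)) (-1) 0
      = (levIdx al bl al.length bl.length : Int) := by
  have hinit : PySem.List.pyRange 0 (PySem.List.len bl + 1) 1
      = (List.range (bl.length + 1)).map (fun j => (levIdx al bl 0 j : Int)) := by
    simp only [levIdx_zero_left]
    rw [PySem.List.len_eq]
    have : (bl.length : Int) + 1 = ((bl.length + 1 : Nat) : Int) := by push_cast; ring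
    rw [this, PySem.List.pyRange_zero_natCast]
  rw [hinit]
  have h0 : PySem.List.enumerate al = PySem.List.enumerate al ((0 : Nat) : Int) := by norm_num
  rw [h0, levOuter al bl al 0 (by omega) rfl]
  rw [List.range_succ, List.map_append, List.map_singleton,
    PySem.List.pyGetD_neg_one_append_singleton]

theorem levA_eq (a b : String) :
    levA a b = (levIdx a.toList b.toList a.toList.length b.toList.length : Int) := by
  unfold levA
  by_cases hab : a = b
  · rw [if_pos hab]
    subst hab
    rw [(levIdx_full_zero_iff a.toList a.toList).mpr rfl]
    rfl
  · rw [if_neg hab]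
    by_cases hlen : PySem.Str.len a < PySem.Str.len b
    · rw [if_pos hlen]
      simp only []
      rw [levDP_eq b.toList a.toList]
      rw [levIdx_symm]
    · rw [if_neg hlen]
      simp only []
      rw [levDP_eq a.toList b.toList]

-- the two loop guards agree
theorem guard_iff (s t : String) :
    ((0 : Int) < levA s t ∧ levA s t ≤ 2) ↔
      (s ≠ t ∧ closeB s.toList t.toList s.toList.length t.toList.length 2 = true) := by
  rw [levA_eq, closeB_spec]
  simp only [decide_eq_true_eq]
  constructor
  · rintro ⟨h1, h2⟩
    have hne : levIdx s.toList t.toList s.toList.length t.toList.length ≠ 0 := by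
      intro h; rw [h] at h1; norm_num at h1
    refine ⟨?_, by omega⟩
    intro hst
    subst hst
    exact hne ((levIdx_full_zero_iff _ _).mpr rfl)
  · rintro ⟨h1, h2⟩
    have hne : levIdx s.toList t.toList s.toList.length t.toList.length ≠ 0 := by
      intro h
      exact h1 (String.toList_inj.mp ((levIdx_full_zero_iff _ _).mp h))
    omega

theorem loop_eq (base : String) : ∀ l : List String, loopA base l = loopB base l := by
  intro l
  induction l with
  | nil => rfl
  | cons t rest ih =>
    unfold loopA loopB
    simp only []
    by_cases h : (0 : Int) < levA base (PySem.List.pyGetD ((PySem.Str.split? t ".").getD []) 0 "") ∧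
        levA base (PySem.List.pyGetD ((PySem.Str.split? t ".").getD []) 0 "") ≤ 2
    · rw [if_pos h, if_pos ((guard_iff base _).mp h)]
    · rw [if_neg h, if_neg (fun hb => h ((guard_iff base _).mpr hb))]
      exact ih

-- ===== VERDICT (by name: the statement is the Claim_ definition above) =====
theorem fuzzy_impersonation_spec : Claim_equal_fuzzy_impersonation := by
  intro domain _ _
  unfold Spec_fuzzy_impersonation fuzzy_impersonation fuzzy_impersonation_alt
  by_cases h : pyWHITELIST.contains domain
  · rw [if_pos h, if_pos h]
  · rw [if_neg h, if_neg h]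
    exact loop_eq _ pyWHITELIST
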